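-- pv_equiv track=rewrite | github.com/jadepics/ProgAMOD | salbp/constructive.py | _rpw_scores
-- ===== SOURCE A (Python) =====
-- from typing import Dict, List, Set, Tuple, Iterable
--
-- def _succs_from_preds(tasks: List, preds: Dict) -> Dict:
--     succs = {u: set() for u in tasks}
--     for j in tasks:
--         pj = preds.get(j) or []
--         for p in pj:
--             succs.setdefault(p, set()).add(j)
--     return succs
--
-- def _rpw_scores(tasks: List, times: Dict, preds: Dict) -> Dict:
--     """Ranked Positional Weight: ti + somma tempi dei successori (transitivi)."""
--     succs = _succs_from_preds(tasks, preds)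
--     memo = {}
--     def dfs(u):
--         if u in memo:
--             return memo[u]
--         tot = times[u]
--         for v in succs.get(u, []):
--             tot += dfs(v)
--         memo[u] = tot
--         return tot
--     return {i: dfs(i) for i in tasks}
-- ===== SOURCE B (Python) =====
-- def _rpw_scores(tasks, times, preds):
--     """Ranked Positional Weight via iterative relaxation: no recursion, no memo.
--
--     Build the (deduplicated) direct-successor lists among tasks, then repeat the
--     dense update score[u] = times[u] + sum(score[v] for v in succs[u]) once per
--     distinct task: on an acyclic precedence graph that reaches the fixpoint,
--     which is exactly the memoized-DFS value (successor scores double-counted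
--     along multiple paths, as in A).
--     """
--     succs = {u: [] for u in tasks}
--     for j in tasks:
--         for p in (preds.get(j) or []):
--             if p in succs and j not in succs[p]:
--                 succs[p].append(j)
--     score = {u: times[u] for u in tasks}
--     for _ in range(len(score)):
--         score = {u: times[u] + sum(score[v] for v in succs[u]) for u in tasks}
--     return score
-- ===== Notes on version B (the rewrite author's own statement) =====
-- stated objective: simpler
-- what changed: Replaces A's memoized recursive DFS over transitive successors by a non-recursive fixpoint iteration: build deduplicated successor lists, then apply the dense update score[u] = times[u] + sum(score[v] for v in succs[u]) once per distinct task, which reaches the same (double-counted) ranked-positional-weight values on acyclic precedence graphs without recursion or a memo table.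
import Mathlib
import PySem

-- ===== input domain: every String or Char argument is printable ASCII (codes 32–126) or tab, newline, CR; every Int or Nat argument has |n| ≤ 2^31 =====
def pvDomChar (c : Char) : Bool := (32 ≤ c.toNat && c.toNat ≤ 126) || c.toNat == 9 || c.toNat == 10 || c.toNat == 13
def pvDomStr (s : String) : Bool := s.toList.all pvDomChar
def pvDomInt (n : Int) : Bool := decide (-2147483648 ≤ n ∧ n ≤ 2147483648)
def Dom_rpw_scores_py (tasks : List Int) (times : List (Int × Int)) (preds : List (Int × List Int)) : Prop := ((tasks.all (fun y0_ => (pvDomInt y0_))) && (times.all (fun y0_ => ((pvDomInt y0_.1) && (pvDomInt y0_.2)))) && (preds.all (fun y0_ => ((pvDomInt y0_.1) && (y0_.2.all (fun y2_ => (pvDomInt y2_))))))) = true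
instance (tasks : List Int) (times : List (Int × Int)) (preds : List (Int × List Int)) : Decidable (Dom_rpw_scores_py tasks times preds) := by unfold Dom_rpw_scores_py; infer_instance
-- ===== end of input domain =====

-- B replaces A's memoized recursive DFS by a non-recursive fixpoint iteration (one dense
-- relaxation round per distinct task); equal on acyclic precedence graphs whose tasks all
-- have times (Pre_), i.e. wherever Python A returns instead of raising.

-- ===== PORT A =====
-- succs = {u: set() for u in tasks}; for j in tasks: for p in (preds.get(j) or []): succs.setdefault(p, set()).add(j)
-- ('preds.get(j) or []' equals getD j [] because the only falsy list value is []).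
def succsA (tasks : List Int) (predsD : PySem.Dict Int (List Int)) : PySem.Dict Int (PySem.Set Int) :=
  tasks.foldl
    (fun d j =>
      (predsD.getD j []).foldl
        (fun d p => d.insert p (PySem.Set.add (d.getD p PySem.Set.empty) j)) d)
    (tasks.foldl (fun d u => d.insert u PySem.Set.empty) PySem.Dict.empty)

-- the memoized dfs; fuel = tasks.length + 1 bounds the recursion depth, which suffices on every
-- acyclic input (Pre_); `none` marks where Python raises (KeyError on times / unbounded recursion).
def dfsA (S : PySem.Dict Int (PySem.Set Int)) (timesD : PySem.Dict Int Int) :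
    Nat → Int → PySem.Dict Int Int → Option (Int × PySem.Dict Int Int)
  | 0, _, _ => none
  | fuel+1, u, memo =>
    match memo.get? u with
    | some v => some (v, memo)
    | none =>
      match timesD.get? u with
      | none => none
      | some t =>
        -- tot = times[u]; for v in succs.get(u, []): tot += dfs(v)   (sum is iteration-order independent)
        match (S.getD u PySem.Set.empty : List Int).foldl
            (fun acc v =>
              match acc with
              | none => none
              | some (tot, m) =>
                match dfsA S timesD fuel v m with
                | none => none
                | some (r, m') => some (tot + r, m'))
            (some (t, memo)) with
        | none => none
        | some (tot, m) => some (tot, m.insert u tot)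

def rpw_scores_py (tasks : List Int) (times : List (Int × Int)) (preds : List (Int × List Int)) : List (Int × Int) :=
  let timesD := PySem.Dict.ofList times
  let predsD := PySem.Dict.ofList preds
  let S := succsA tasks predsD
  -- {i: dfs(i) for i in tasks}, the memo threaded left to right
  match tasks.foldl
      (fun acc i =>
        match acc with
        | none => none
        | some (res, memo) =>
          match dfsA S timesD (tasks.length + 1) i memo with
          | none => none
          | some (v, m') => some (res.insert i v, m'))
      (some (PySem.Dict.empty, PySem.Dict.empty)) with
  | none => []   -- unreachable under Pre_ (Python raises there)
  | some (res, _) => res.items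

-- ===== PORT B =====
-- succs = {u: [] for u in tasks}; for j in tasks: for p in (preds.get(j) or []):
--   if p in succs and j not in succs[p]: succs[p].append(j)
def succsB (tasks : List Int) (predsD : PySem.Dict Int (List Int)) : PySem.Dict Int (List Int) :=
  tasks.foldl
    (fun d j =>
      (predsD.getD j []).foldl
        (fun d p =>
          if d.contains p then
            if (d.getD p []).contains j then d else d.insert p (d.getD p [] ++ [j])
          else d) d)
    (tasks.foldl (fun d u => d.insert u ([] : List Int)) PySem.Dict.empty)

-- score = {u: times[u] + sum(score[v] for v in succs[u]) for u in tasks}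
-- (times[u] ported as getD u 0: exact under Pre_, where every task has a time)
def bStep (tasks : List Int) (timesD : PySem.Dict Int Int) (S : PySem.Dict Int (List Int))
    (score : PySem.Dict Int Int) : PySem.Dict Int Int :=
  tasks.foldl
    (fun d u => d.insert u (timesD.getD u 0 + ((S.getD u []).map (fun v => score.getD v 0)).sum))
    PySem.Dict.empty

-- for _ in range(len(score)): score = {…}
def bRounds (tasks : List Int) (timesD : PySem.Dict Int Int) (S : PySem.Dict Int (List Int)) :
    Nat → PySem.Dict Int Int → PySem.Dict Int Int
  | 0, score => score
  | k+1, score => bRounds tasks timesD S k (bStep tasks timesD S score)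

def rpw_scores_py_alt (tasks : List Int) (times : List (Int × Int)) (preds : List (Int × List Int)) : List (Int × Int) :=
  let timesD := PySem.Dict.ofList times
  let predsD := PySem.Dict.ofList preds
  let S := succsB tasks predsD
  let score0 := tasks.foldl (fun d u => d.insert u (timesD.getD u 0)) PySem.Dict.empty
  (bRounds tasks timesD S score0.size score0).items

-- ===== PRECONDITION & SPEC =====
-- direct successors of u among the tasks: the j with u in preds[j]
def pvSuccOf (tasks : List Int) (predsD : PySem.Dict Int (List Int)) (u : Int) : List Int :=
  tasks.filter (fun j => (predsD.getD j []).contains u)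

-- topological peeling: each round removes every node all of whose successors are already gone
def pvPeel (succ : Int → List Int) : Nat → List Int → List Int
  | 0, _ => []
  | k+1, rem =>
    rem.filter (fun u => (succ u).all (fun v => !rem.contains v))
      ++ pvPeel succ k (rem.filter (fun u => !((succ u).all (fun v => !rem.contains v))))

-- Pre_: every task has a processing time, and the precedence graph restricted to the tasks is
-- acyclic (its topological peeling is complete) — exactly the inputs on which Python A returns
-- instead of raising KeyError resp. RecursionError.
def Pre_rpw_scores_py (tasks : List Int) (times : List (Int × Int)) (preds : List (Int × List Int)) : Prop :=
  tasks.all (fun u => (PySem.Dict.ofList times).contains u) = true ∧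
  (pvPeel (pvSuccOf tasks (PySem.Dict.ofList preds)) (PySem.List.dedup tasks).length
      (PySem.List.dedup tasks)).length = (PySem.List.dedup tasks).length

instance (tasks : List Int) (times : List (Int × Int)) (preds : List (Int × List Int)) : Decidable (Pre_rpw_scores_py tasks times preds) := by unfold Pre_rpw_scores_py; infer_instance

def pvWitness_rpw_scores_py : List Int × (List (Int × Int)) × (List (Int × List Int)) :=
  ([1, 2], [(1, 3), (2, 4)], [(2, [1])])

def Spec_rpw_scores_py (tasks : List Int) (times : List (Int × Int)) (preds : List (Int × List Int)) (out : List (Int × Int)) : Prop := out = rpw_scores_py_alt tasks times preds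
instance (tasks : List Int) (times : List (Int × Int)) (preds : List (Int × List Int)) (out : List (Int × Int)) : Decidable (Spec_rpw_scores_py tasks times preds out) := by unfold Spec_rpw_scores_py; infer_instance

-- ===== CLAIM (what is proved, stated in full; the proofs are below) =====
def Claim_equal_rpw_scores_py : Prop := ∀ (tasks : List Int) (times : List (Int × Int)) (preds : List (Int × List Int)), Dom_rpw_scores_py tasks times preds → Pre_rpw_scores_py tasks times preds → Spec_rpw_scores_py tasks times preds (rpw_scores_py tasks times preds)

-- ===== LEMMAS AND PROOFS =====

-- value of a `{u: f(u) for u in l}`-style insert loop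
theorem pv_get?_foldl_insert {v : Type} (l : List Int) (f : Int → v) (d : PySem.Dict Int v) (x : Int) :
    (l.foldl (fun d u => d.insert u (f u)) d).get? x = if x ∈ l then some (f x) else d.get? x := by
  induction l generalizing d with
  | nil => simp
  | cons a l ih =>
    simp only [List.foldl_cons, ih, List.mem_cons]
    by_cases hx : x ∈ l
    · simp [hx]
    · by_cases hxa : x = a
      · subst hxa; simp [hx, PySem.Dict.get?_insert_self]
      · simp [hx, hxa, PySem.Dict.get?_insert_of_ne _ _ hxa]

theorem pv_items_eq_keys_map {v : Type} (d : PySem.Dict Int v) (d0 : v) (h : d.keys.Nodup) :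
    d.items = d.keys.map (fun k => (k, d.getD k d0)) := by
  have h2 : d.items.map (fun p => (p.1, d.getD p.1 d0)) = d.items.map id := by
    apply List.map_congr_left
    intro p hp
    have := PySem.Dict.getD_of_mem_items (d := d) (k := p.1) (v := p.2) (by simpa using hp) h d0
    simp [this]
  calc d.items = d.items.map id := by simp
    _ = d.items.map (fun p => (p.1, d.getD p.1 d0)) := h2.symm
    _ = d.keys.map (fun k => (k, d.getD k d0)) := by
        simp [PySem.Dict.keys, List.map_map, Function.comp_def]

theorem pv_contains_get? {v : Type} (d : PySem.Dict Int v) (k : Int) (d0 : v)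
    (h : d.contains k = true) : d.get? k = some (d.getD k d0) := by
  rw [PySem.Dict.contains_eq_isSome_get?] at h
  cases hk : d.get? k with
  | none => rw [hk] at h; simp at h
  | some w => rw [PySem.Dict.getD_of_get?_eq_some _ d0 hk]

-- the fuel-indexed value functional: valF (k+1) u = t u + sum of valF k over the successors
def valF (succ : Int → List Int) (t : Int → Int) : Nat → Int → Int
  | 0, u => t u
  | k+1, u => t u + ((succ u).map (fun v => valF succ t k v)).sum

theorem valF_congr (succ1 succ2 : Int → List Int) (t : Int → Int) (C : List Int)
    (hs : ∀ u ∈ C, succ1 u = succ2 u) (hc : ∀ u ∈ C, ∀ v ∈ succ1 u, v ∈ C) :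
    ∀ k u, u ∈ C → valF succ1 t k u = valF succ2 t k u := by
  intro k
  induction k with
  | zero => intro u _; rfl
  | succ k ih =>
    intro u hu
    simp only [valF, ← hs u hu]
    congr 1
    refine congrArg _ (List.map_congr_left ?_)
    intro v hv
    exact ih v (hc u hu v hv)

-- a reverse topological order: every successor appears strictly earlier
def TopOrd (succ : Int → List Int) (L : List Int) : Prop :=
  ∀ l1 u l2, L = l1 ++ u :: l2 → ∀ v ∈ succ u, v ∈ l1

theorem valF_stab (succ : Int → List Int) (t : Int → Int) (L : List Int) (hT : TopOrd succ L) :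
    ∀ m : Nat, ∀ u l1 l2, L = l1 ++ u :: l2 → l1.length = m →
      ∀ i j : Nat, m < i → m < j → valF succ t i u = valF succ t j u := by
  intro m
  induction m using Nat.strong_induction_on with
  | _ m IH =>
    intro u l1 l2 hL hm i j hi hj
    obtain ⟨i, rfl⟩ : ∃ i', i = i' + 1 := ⟨i - 1, by omega⟩
    obtain ⟨j, rfl⟩ : ∃ j', j = j' + 1 := ⟨j - 1, by omega⟩
    simp only [valF]
    congr 1
    refine congrArg _ (List.map_congr_left ?_)
    intro v hv
    have hv1 : v ∈ l1 := hT l1 u l2 hL v hv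
    obtain ⟨a, b, hab⟩ := List.append_of_mem hv1
    have hLv : L = a ++ v :: (b ++ u :: l2) := by simp [hL, hab]
    have ha : a.length < m := by
      have := congrArg List.length hab
      simp at this; omega
    exact IH a.length ha v a (b ++ u :: l2) hLv rfl i j (by omega) (by omega)

theorem valF_fix (succ : Int → List Int) (t : Int → Int) (L : List Int) (hT : TopOrd succ L)
    (l1 : List Int) (u : Int) (l2 : List Int) (hL : L = l1 ++ u :: l2) :
    valF succ t L.length u = t u + ((succ u).map (fun v => valF succ t L.length v)).sum := by
  have hlen : l1.length < L.length := by simp [hL]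
  have h1 : valF succ t L.length u = valF succ t (l1.length + 1) u :=
    valF_stab succ t L hT l1.length u l1 l2 hL rfl _ _ hlen (by omega)
  rw [h1]
  simp only [valF]
  congr 1
  refine congrArg _ (List.map_congr_left ?_)
  intro v hv
  have hv1 : v ∈ l1 := hT l1 u l2 hL v hv
  obtain ⟨a, b, hab⟩ := List.append_of_mem hv1
  have ha : a.length < l1.length := by
    have := congrArg List.length hab; simp at this; omega
  exact valF_stab succ t L hT a.length v a (b ++ u :: l2) (by simp [hL, hab]) rfl _ _
    (by omega) (by omega)

-- ===== peel lemmas =====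

theorem pvPeel_subset (succ : Int → List Int) :
    ∀ (k : Nat) (rem : List Int), ∀ x ∈ pvPeel succ k rem, x ∈ rem := by
  intro k
  induction k with
  | zero => intro rem x hx; simp [pvPeel] at hx
  | succ k ih =>
    intro rem x hx
    simp only [pvPeel, List.mem_append] at hx
    rcases hx with hx | hx
    · exact (List.mem_filter.1 hx).1
    · exact (List.mem_filter.1 (ih _ x hx)).1

theorem pvPeel_nodup (succ : Int → List Int) :
    ∀ (k : Nat) (rem : List Int), rem.Nodup → (pvPeel succ k rem).Nodup := by
  intro k
  induction k with
  | zero => intro rem _; simp [pvPeel]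
  | succ k ih =>
    intro rem hnd
    simp only [pvPeel]
    refine List.Nodup.append (hnd.filter _) (ih _ (hnd.filter _)) ?_
    intro x hx1 hx2
    have h1 := (List.mem_filter.1 hx1).2
    have h2 := (List.mem_filter.1 (pvPeel_subset succ k _ x hx2)).2
    rw [h1] at h2
    exact absurd h2 (by simp)

theorem pvPeel_toporder (succ : Int → List Int) :
    ∀ (k : Nat) (rem : List Int) (l1 : List Int) (u : Int) (l2 : List Int),
      pvPeel succ k rem = l1 ++ u :: l2 → ∀ v ∈ succ u, v ∈ rem → v ∈ l1 := by
  intro k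
  induction k with
  | zero =>
    intro rem l1 u l2 h
    simp [pvPeel] at h
  | succ k ih =>
    intro rem l1 u l2 h v hv hvrem
    simp only [pvPeel] at h
    rcases List.append_eq_append_iff.1 h.symm with ⟨a', h1, h2⟩ | ⟨c', h1, h2⟩
    · -- first-round = l1 ++ a', u :: l2 = a' ++ rest
      cases a' with
      | nil =>
        simp only [List.append_nil] at h1
        simp only [List.nil_append] at h2
        by_cases hPv : ((succ v).all (fun w => !rem.contains w)) = true
        · rw [← h1]; exact List.mem_filter.2 ⟨hvrem, hPv⟩
        · have hPf : ((succ v).all (fun w => !rem.contains w)) = false := by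
            revert hPv; cases h' : ((succ v).all (fun w => !rem.contains w)) <;> simp
          have hvrem' : v ∈ rem.filter (fun u => !((succ u).all (fun v => !rem.contains v))) :=
            List.mem_filter.2 ⟨hvrem, by rw [hPf]; rfl⟩
          exact absurd (ih _ [] u l2 h2.symm v hv hvrem') (by simp)
      | cons c0 c' =>
        -- u is in the first round: all its successors have left rem entirely
        have hu0 : u = c0 := by
          have := congrArg (fun l => l.head?) h2
          simpa using this
        subst hu0
        have hu : u ∈ rem.filter (fun u => (succ u).all (fun v => !rem.contains v)) := by
          rw [h1]; simp
        have hall := (List.mem_filter.1 hu).2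
        simp only [List.all_eq_true] at hall
        have := hall v hv
        simp at this
        exact absurd hvrem this
    · -- l1 = first-round ++ c', rest = c' ++ u :: l2 : u comes from the recursive peel
      rw [h1, List.mem_append]
      by_cases hPv : ((succ v).all (fun w => !rem.contains w)) = true
      · exact Or.inl (List.mem_filter.2 ⟨hvrem, hPv⟩)
      · have hPf : ((succ v).all (fun w => !rem.contains w)) = false := by
          revert hPv; cases h' : ((succ v).all (fun w => !rem.contains w)) <;> simp
        have hvrem' : v ∈ rem.filter (fun u => !((succ u).all (fun v => !rem.contains v))) :=
          List.mem_filter.2 ⟨hvrem, by rw [hPf]; rfl⟩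
        exact Or.inr (ih _ c' u l2 h2 v hv hvrem')

theorem pvPeel_perm (succ : Int → List Int) (k : Nat) (rem : List Int) (hnd : rem.Nodup)
    (hlen : (pvPeel succ k rem).length = rem.length) : (pvPeel succ k rem).Perm rem := by
  have h1 : (pvPeel succ k rem).Subperm rem :=
    (pvPeel_nodup succ k rem hnd).subperm (fun x hx => pvPeel_subset succ k rem x hx)
  exact List.Subperm.perm_of_length_le h1 (by omega)

theorem succs_inner_inv (tasks : List Int) (j : Int) (P : Int → Int → Prop) :
    ∀ (pl acc : List Int) (dA : PySem.Dict Int (PySem.Set Int)) (dB : PySem.Dict Int (List Int)),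
    (∀ x, dB.get? x = if x ∈ tasks then dA.get? x else none) →
    (∀ u ∈ tasks, ∃ s : List Int, dA.get? u = some s ∧ ∀ v, v ∈ s ↔ (P v u ∨ (v = j ∧ u ∈ acc))) →
    (∀ x, (pl.foldl (fun d p =>
              if d.contains p then
                if (d.getD p []).contains j then d else d.insert p (d.getD p [] ++ [j])
              else d) dB).get? x
        = if x ∈ tasks
          then (pl.foldl (fun d p => d.insert p (PySem.Set.add (d.getD p PySem.Set.empty) j)) dA).get? x
          else none)
    ∧ (∀ u ∈ tasks, ∃ s : List Int,
        (pl.foldl (fun d p => d.insert p (PySem.Set.add (d.getD p PySem.Set.empty) j)) dA).get? u = some s ∧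
        ∀ v, v ∈ s ↔ (P v u ∨ (v = j ∧ u ∈ acc ++ pl))) := by
  intro pl
  induction pl with
  | nil =>
    intro acc dA dB hlink hchar
    exact ⟨hlink, by simpa using hchar⟩
  | cons p pl ih =>
    intro acc dA dB hlink hchar
    simp only [List.foldl_cons]
    have step : ∀ (dA' : PySem.Dict Int (PySem.Set Int)) (dB' : PySem.Dict Int (List Int)),
        (∀ x, dB'.get? x = if x ∈ tasks then dA'.get? x else none) →
        (∀ u ∈ tasks, ∃ s : List Int, dA'.get? u = some s ∧
            ∀ v, v ∈ s ↔ (P v u ∨ (v = j ∧ u ∈ acc ++ [p]))) →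
        (∀ x, (pl.foldl (fun d p =>
                  if d.contains p then
                    if (d.getD p []).contains j then d else d.insert p (d.getD p [] ++ [j])
                  else d) dB').get? x
            = if x ∈ tasks
              then (pl.foldl (fun d p => d.insert p (PySem.Set.add (d.getD p PySem.Set.empty) j)) dA').get? x
              else none)
        ∧ (∀ u ∈ tasks, ∃ s : List Int,
            (pl.foldl (fun d p => d.insert p (PySem.Set.add (d.getD p PySem.Set.empty) j)) dA').get? u = some s ∧
            ∀ v, v ∈ s ↔ (P v u ∨ (v = j ∧ u ∈ acc ++ p :: pl))) := by
      intro dA' dB' h1 h2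
      obtain ⟨ha, hb⟩ := ih (acc ++ [p]) dA' dB' h1 h2
      refine ⟨ha, ?_⟩
      intro u hu
      obtain ⟨s, hs, hv⟩ := hb u hu
      refine ⟨s, hs, ?_⟩
      intro v
      rw [hv v]
      simp
    by_cases hp : p ∈ tasks
    · obtain ⟨sp, hsp, hcp⟩ := hchar p hp
      have hBp : dB.get? p = some sp := by rw [hlink p, if_pos hp, hsp]
      have hBc : dB.contains p = true := by
        rw [PySem.Dict.contains_eq_isSome_get?, hBp]; rfl
      have hBgd : dB.getD p [] = sp := PySem.Dict.getD_of_get?_eq_some _ _ hBp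
      have hAgd : dA.getD p PySem.Set.empty = sp := PySem.Dict.getD_of_get?_eq_some _ _ hsp
      by_cases hj : j ∈ sp
      · have hadd : PySem.Set.add (dA.getD p PySem.Set.empty) j = sp := by
          rw [hAgd]; exact PySem.Set.add_of_mem hj
        have hjc : sp.contains j = true := by simpa using hj
        rw [hBc, if_pos rfl, hBgd, hjc, if_pos rfl, hadd]
        apply step
        · intro x
          by_cases hxp : x = p
          · subst hxp
            rw [hlink x]
            simp [hp, hsp, PySem.Dict.get?_insert_self]
          · rw [hlink x, PySem.Dict.get?_insert_of_ne _ _ hxp]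
        · intro u hu
          by_cases hup : u = p
          · subst hup
            refine ⟨sp, PySem.Dict.get?_insert_self _ _ _, ?_⟩
            intro v
            constructor
            · intro hvs
              rcases (hcp v).1 hvs with h | ⟨rfl, h⟩
              · exact Or.inl h
              · exact Or.inr ⟨rfl, by simp⟩
            · rintro (h | ⟨rfl, -⟩)
              · exact (hcp v).2 (Or.inl h)
              · exact hj
          · obtain ⟨s, hs, hv⟩ := hchar u hu
            refine ⟨s, by rw [PySem.Dict.get?_insert_of_ne _ _ hup]; exact hs, ?_⟩
            intro v
            rw [hv v]
            simp [hup]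
      · have hadd : PySem.Set.add (dA.getD p PySem.Set.empty) j = sp ++ [j] := by
          rw [hAgd]; exact PySem.Set.add_of_not_mem hj
        have hjc : sp.contains j = false := by
          cases h' : sp.contains j
          · rfl
          · exact absurd (List.mem_of_elem_eq_true h') hj
        rw [hBc, if_pos rfl, hBgd, hjc, hadd]
        simp only [Bool.false_eq_true, if_false]
        apply step
        · intro x
          by_cases hxp : x = p
          · subst hxp
            rw [PySem.Dict.get?_insert_self, if_pos hp, PySem.Dict.get?_insert_self]
          · rw [PySem.Dict.get?_insert_of_ne _ _ hxp, hlink x,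
              PySem.Dict.get?_insert_of_ne _ _ hxp]
        · intro u hu
          by_cases hup : u = p
          · subst hup
            refine ⟨sp ++ [j], PySem.Dict.get?_insert_self _ _ _, ?_⟩
            intro v
            constructor
            · intro hvs
              rcases List.mem_append.1 hvs with h | h
              · rcases (hcp v).1 h with h' | ⟨rfl, h'⟩
                · exact Or.inl h'
                · exact Or.inr ⟨rfl, by simp⟩
              · simp at h
                exact Or.inr ⟨h, by simp⟩
            · rintro (h | ⟨rfl, -⟩)
              · exact List.mem_append_left _ ((hcp v).2 (Or.inl h))
              · simp
          · obtain ⟨s, hs, hv⟩ := hchar u hu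
            refine ⟨s, by rw [PySem.Dict.get?_insert_of_ne _ _ hup]; exact hs, ?_⟩
            intro v
            rw [hv v]
            simp [hup]
    · have hBn : dB.get? p = none := by rw [hlink p, if_neg hp]
      have hBc : dB.contains p = false := by
        rw [PySem.Dict.contains_eq_isSome_get?, hBn]; rfl
      rw [hBc]
      simp only [Bool.false_eq_true, if_false]
      apply step
      · intro x
        by_cases hxp : x = p
        · subst hxp
          rw [hlink x, if_neg hp, if_neg hp]
        · rw [hlink x, PySem.Dict.get?_insert_of_ne _ _ hxp]
      · intro u hu
        have hup : u ≠ p := fun h => hp (h ▸ hu)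
        obtain ⟨s, hs, hv⟩ := hchar u hu
        refine ⟨s, by rw [PySem.Dict.get?_insert_of_ne _ _ hup]; exact hs, ?_⟩
        intro v
        rw [hv v]
        simp [hup]

theorem succs_fold_inv (tasks : List Int) (predsD : PySem.Dict Int (List Int)) :
    ∀ (rest done : List Int), (∀ j ∈ rest, j ∈ tasks) →
    ∀ (dA : PySem.Dict Int (PySem.Set Int)) (dB : PySem.Dict Int (List Int)),
    (∀ x, dB.get? x = if x ∈ tasks then dA.get? x else none) →
    (∀ u ∈ tasks, ∃ s : List Int, dA.get? u = some s ∧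
        ∀ v, v ∈ s ↔ (v ∈ done ∧ (predsD.getD v []).contains u = true)) →
    (∀ x, (rest.foldl (fun d j =>
          (predsD.getD j []).foldl
            (fun d p =>
              if d.contains p then
                if (d.getD p []).contains j then d else d.insert p (d.getD p [] ++ [j])
              else d) d) dB).get? x
        = if x ∈ tasks
          then (rest.foldl (fun d j =>
            (predsD.getD j []).foldl
              (fun d p => d.insert p (PySem.Set.add (d.getD p PySem.Set.empty) j)) d) dA).get? x
          else none)
    ∧ (∀ u ∈ tasks, ∃ s : List Int,
        (rest.foldl (fun d j =>
            (predsD.getD j []).foldl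
              (fun d p => d.insert p (PySem.Set.add (d.getD p PySem.Set.empty) j)) d) dA).get? u = some s ∧
        ∀ v, v ∈ s ↔ ((v ∈ done ∨ v ∈ rest) ∧ (predsD.getD v []).contains u = true)) := by
  intro rest
  induction rest with
  | nil =>
    intro done _ dA dB hlink hchar
    refine ⟨hlink, ?_⟩
    intro u hu
    obtain ⟨s, hs, hv⟩ := hchar u hu
    exact ⟨s, hs, by intro v; rw [hv v]; simp⟩
  | cons j rest ih =>
    intro done hrest dA dB hlink hchar
    simp only [List.foldl_cons]
    have hj : j ∈ tasks := hrest j (by simp)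
    obtain ⟨ha, hb⟩ := succs_inner_inv tasks j
      (fun v u => v ∈ done ∧ (predsD.getD v []).contains u = true)
      (predsD.getD j []) [] dA dB hlink
      (by
        intro u hu
        obtain ⟨s, hs, hv⟩ := hchar u hu
        exact ⟨s, hs, by intro v; rw [hv v]; simp⟩)
    obtain ⟨hc, hd⟩ := ih (done ++ [j]) (fun x hx => hrest x (by simp [hx])) _ _ ha
      (by
        intro u hu
        obtain ⟨s, hs, hv⟩ := hb u hu
        refine ⟨s, hs, ?_⟩
        intro v
        rw [hv v]
        simp only [List.nil_append, List.mem_append, List.mem_singleton]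
        constructor
        · rintro (⟨h1, h2⟩ | ⟨rfl, h2⟩)
          · exact ⟨Or.inl h1, h2⟩
          · exact ⟨Or.inr rfl, by simpa using h2⟩
        · rintro ⟨h1 | rfl, h2⟩
          · exact Or.inl ⟨h1, h2⟩
          · exact Or.inr ⟨rfl, by simpa using h2⟩)
    refine ⟨hc, ?_⟩
    intro u hu
    obtain ⟨s, hs, hv⟩ := hd u hu
    refine ⟨s, hs, ?_⟩
    intro v
    rw [hv v]
    simp only [List.mem_append, List.mem_cons]
    tauto

theorem succs_char (tasks : List Int) (predsD : PySem.Dict Int (List Int)) :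
    (∀ x, (succsB tasks predsD).get? x
        = if x ∈ tasks then (succsA tasks predsD).get? x else none)
    ∧ (∀ u ∈ tasks, ∃ s : List Int, (succsA tasks predsD).get? u = some s ∧
        ∀ v, v ∈ s ↔ (v ∈ tasks ∧ (predsD.getD v []).contains u = true)) := by
  obtain ⟨ha, hb⟩ := succs_fold_inv tasks predsD tasks [] (fun _ h => h)
    (tasks.foldl (fun d u => d.insert u PySem.Set.empty) PySem.Dict.empty)
    (tasks.foldl (fun d u => d.insert u ([] : List Int)) PySem.Dict.empty)
    (by
      intro x
      rw [pv_get?_foldl_insert tasks (fun _ => PySem.Set.empty) PySem.Dict.empty x,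
        pv_get?_foldl_insert tasks (fun _ => ([] : List Int)) PySem.Dict.empty x]
      by_cases hx : x ∈ tasks <;> simp [hx, PySem.Dict.get?_empty])
    (by
      intro u hu
      rw [pv_get?_foldl_insert tasks (fun _ => PySem.Set.empty) PySem.Dict.empty u]
      exact ⟨[], by simp [hu], by simp⟩)
  exact ⟨ha, by
    intro u hu
    obtain ⟨s, hs, hv⟩ := hb u hu
    exact ⟨s, hs, by intro v; rw [hv v]; simp⟩⟩


-- ===== A-side: the memoized dfs computes the fixpoint values =====

-- every memo entry is a task with its final value
def pvGood (L : List Int) (V : Int → Int) (memo : PySem.Dict Int Int) : Prop :=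
  ∀ u x, memo.get? u = some x → u ∈ L ∧ x = V u

theorem dfsA_sound (S : PySem.Dict Int (PySem.Set Int)) (timesD : PySem.Dict Int Int) (L : List Int)
    (hT : TopOrd (fun u => (S.getD u PySem.Set.empty : List Int)) L)
    (ht : ∀ u ∈ L, timesD.get? u = some (timesD.getD u 0)) :
    ∀ m : Nat, ∀ u l1 l2, L = l1 ++ u :: l2 → l1.length = m →
      ∀ fuel memo, m < fuel →
      pvGood L (valF (fun u => (S.getD u PySem.Set.empty : List Int)) (fun u => timesD.getD u 0) L.length) memo →
      ∃ memo', dfsA S timesD fuel u memo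
          = some (valF (fun u => (S.getD u PySem.Set.empty : List Int)) (fun u => timesD.getD u 0) L.length u, memo')
        ∧ pvGood L (valF (fun u => (S.getD u PySem.Set.empty : List Int)) (fun u => timesD.getD u 0) L.length) memo' := by
  intro m
  induction m using Nat.strong_induction_on with
  | _ m IH =>
    intro u l1 l2 hL hm fuel memo hfuel hgood
    obtain ⟨f, rfl⟩ : ∃ f, fuel = f + 1 := ⟨fuel - 1, by omega⟩
    simp only [dfsA]
    cases hmu : memo.get? u with
    | some x =>
      obtain ⟨hx1, hx2⟩ := hgood u x hmu
      exact ⟨memo, by rw [hx2], hgood⟩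
    | none =>
      have hu : u ∈ L := by rw [hL]; simp
      rw [ht u hu]
      have hfold : ∀ (vs : List Int), (∀ v ∈ vs, v ∈ l1) → ∀ (tot : Int) (memo1 : PySem.Dict Int Int),
          pvGood L (valF (fun u => (S.getD u PySem.Set.empty : List Int)) (fun u => timesD.getD u 0) L.length) memo1 →
          ∃ memo2, vs.foldl
              (fun acc v =>
                match acc with
                | none => none
                | some (tot, m) =>
                  match dfsA S timesD f v m with
                  | none => none
                  | some (r, m') => some (tot + r, m'))
              (some (tot, memo1))
            = some (tot + (vs.map (valF (fun u => (S.getD u PySem.Set.empty : List Int)) (fun u => timesD.getD u 0) L.length)).sum, memo2)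
            ∧ pvGood L (valF (fun u => (S.getD u PySem.Set.empty : List Int)) (fun u => timesD.getD u 0) L.length) memo2 := by
        intro vs
        induction vs with
        | nil => intro _ tot memo1 hg1; exact ⟨memo1, by simp, hg1⟩
        | cons v vs ihv =>
          intro hmem tot memo1 hg1
          have hv1 : v ∈ l1 := hmem v (by simp)
          obtain ⟨a, b, hab⟩ := List.append_of_mem hv1
          have hLv : L = a ++ v :: (b ++ u :: l2) := by simp [hL, hab]
          have ha : a.length < m := by
            have := congrArg List.length hab
            simp at this; omega
          obtain ⟨memo2, hdfs, hg2⟩ :=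
            IH a.length ha v a (b ++ u :: l2) hLv rfl f memo1 (by omega) hg1
          obtain ⟨memo3, hrest, hg3⟩ := ihv (fun w hw => hmem w (by simp [hw]))
            (tot + valF (fun u => (S.getD u PySem.Set.empty : List Int)) (fun u => timesD.getD u 0) L.length v) memo2 hg2
          refine ⟨memo3, ?_, hg3⟩
          simp only [List.foldl_cons, hdfs, hrest]
          simp [add_assoc]
      obtain ⟨memo2, hrun, hg2⟩ := hfold (S.getD u PySem.Set.empty : List Int)
        (fun v hv => hT l1 u l2 hL v hv) (timesD.getD u 0) memo hgood
      simp only [hrun]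
      have hVu : valF (fun u => (S.getD u PySem.Set.empty : List Int)) (fun u => timesD.getD u 0) L.length u
          = timesD.getD u 0 + (((S.getD u PySem.Set.empty : List Int)).map
              (valF (fun u => (S.getD u PySem.Set.empty : List Int)) (fun u => timesD.getD u 0) L.length)).sum :=
        valF_fix _ _ L hT l1 u l2 hL
      refine ⟨memo2.insert u _, by rw [hVu], ?_⟩
      intro w x hw
      by_cases hwu : w = u
      · subst hwu
        rw [PySem.Dict.get?_insert_self] at hw
        exact ⟨hu, by rw [hVu]; exact (Option.some.inj hw).symm⟩
      · rw [PySem.Dict.get?_insert_of_ne _ _ hwu] at hw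
        exact hg2 w x hw


theorem rpwA_fold (S : PySem.Dict Int (PySem.Set Int)) (timesD : PySem.Dict Int Int) (L : List Int)
    (hT : TopOrd (fun u => (S.getD u PySem.Set.empty : List Int)) L)
    (ht : ∀ u ∈ L, timesD.get? u = some (timesD.getD u 0)) :
    ∀ (l : List Int), (∀ i ∈ l, i ∈ L) → ∀ fuel : Nat, L.length ≤ fuel →
    ∀ (res : PySem.Dict Int Int) (memo : PySem.Dict Int Int),
    pvGood L (valF (fun u => (S.getD u PySem.Set.empty : List Int)) (fun u => timesD.getD u 0) L.length) memo →
    ∃ memo', (l.foldl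
        (fun acc i =>
          match acc with
          | none => none
          | some (res, memo) =>
            match dfsA S timesD fuel i memo with
            | none => none
            | some (v, m') => some (res.insert i v, m'))
        (some (res, memo)))
      = some (l.foldl (fun d i =>
          d.insert i (valF (fun u => (S.getD u PySem.Set.empty : List Int)) (fun u => timesD.getD u 0) L.length i)) res, memo')
      ∧ pvGood L (valF (fun u => (S.getD u PySem.Set.empty : List Int)) (fun u => timesD.getD u 0) L.length) memo' := by
  intro l
  induction l with
  | nil => intro _ fuel _ res memo hg; exact ⟨memo, by simp, hg⟩
  | cons i l ih =>
    intro hmem fuel hfuel res memo hg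
    obtain ⟨l1, l2, hL⟩ := List.append_of_mem (hmem i (by simp))
    have hlen : l1.length < L.length := by simp [hL]
    obtain ⟨memo2, hdfs, hg2⟩ := dfsA_sound S timesD L hT ht l1.length i l1 l2 hL rfl
      fuel memo (by omega) hg
    obtain ⟨memo3, hrest, hg3⟩ := ih (fun w hw => hmem w (by simp [hw])) fuel hfuel
      (res.insert i (valF (fun u => (S.getD u PySem.Set.empty : List Int)) (fun u => timesD.getD u 0) L.length i)) memo2 hg2
    exact ⟨memo3, by simp only [List.foldl_cons, hdfs, hrest], hg3⟩

-- ===== B-side: the relaxation rounds compute the same fixpoint values =====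

theorem bStep_get? (tasks : List Int) (timesD : PySem.Dict Int Int) (S : PySem.Dict Int (List Int))
    (score : PySem.Dict Int Int) (x : Int) :
    (bStep tasks timesD S score).get? x
      = if x ∈ tasks then some (timesD.getD x 0 + ((S.getD x []).map (fun v => score.getD v 0)).sum) else none := by
  unfold bStep
  rw [pv_get?_foldl_insert tasks
    (fun u => timesD.getD u 0 + ((S.getD u []).map (fun v => score.getD v 0)).sum) PySem.Dict.empty x]
  by_cases hx : x ∈ tasks <;> simp [hx, PySem.Dict.get?_empty]

theorem bRounds_get? (tasks : List Int) (timesD : PySem.Dict Int Int) (S : PySem.Dict Int (List Int))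
    (hSsub : ∀ u ∈ tasks, ∀ v ∈ S.getD u [], v ∈ tasks) :
    ∀ (k j : Nat) (s : PySem.Dict Int Int),
    (∀ x, s.get? x = if x ∈ tasks then some (valF (fun u => S.getD u []) (fun u => timesD.getD u 0) j x) else none) →
    ∀ x, (bRounds tasks timesD S k s).get? x
      = if x ∈ tasks then some (valF (fun u => S.getD u []) (fun u => timesD.getD u 0) (j + k) x) else none := by
  intro k
  induction k with
  | zero => intro j s hs x; simpa using hs x
  | succ k ih =>
    intro j s hs x
    have hstep : ∀ y, (bStep tasks timesD S s).get? y
        = if y ∈ tasks then some (valF (fun u => S.getD u []) (fun u => timesD.getD u 0) (j+1) y) else none := by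
      intro y
      rw [bStep_get?]
      by_cases hy : y ∈ tasks
      · have hmaps : (S.getD y []).map (fun v => s.getD v 0)
            = (S.getD y []).map (fun v => valF (fun u => S.getD u []) (fun u => timesD.getD u 0) j v) := by
          refine List.map_congr_left ?_
          intro v hv
          have hvt : v ∈ tasks := hSsub y hy v hv
          have h := hs v
          rw [if_pos hvt] at h
          exact PySem.Dict.getD_of_get?_eq_some _ _ h
        simp only [hy, if_pos, valF, hmaps]
      · simp [hy]
    show (bRounds tasks timesD S (k+1) s).get? x = _
    simp only [bRounds]
    rw [show j + (k+1) = (j+1) + k from by omega]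
    exact ih (j+1) (bStep tasks timesD S s) hstep x

theorem keys_bRounds (tasks : List Int) (timesD : PySem.Dict Int Int) (S : PySem.Dict Int (List Int)) :
    ∀ (k : Nat) (s : PySem.Dict Int Int), s.keys = PySem.Set.ofList tasks →
    (bRounds tasks timesD S k s).keys = PySem.Set.ofList tasks := by
  intro k
  induction k with
  | zero => intro s hs; exact hs
  | succ k ih =>
    intro s hs
    simp only [bRounds]
    apply ih
    unfold bStep
    rw [PySem.Dict.keys_foldl_insert tasks
      (fun d u => timesD.getD u 0 + ((S.getD u []).map (fun v => s.getD v 0)).sum) PySem.Dict.empty]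
    rw [PySem.Set.ofList_eq_foldl]
    rfl

theorem pv_keys_foldl_insert_fn {v : Type} (l : List Int) (f : Int → v) :
    (l.foldl (fun d u => d.insert u (f u)) PySem.Dict.empty).keys = PySem.Set.ofList l := by
  rw [PySem.Dict.keys_foldl_insert l (fun _ u => f u) PySem.Dict.empty, PySem.Set.ofList_eq_foldl]
  rfl

theorem pv_size_keys {v : Type} (d : PySem.Dict Int v) : d.size = d.keys.length := by
  simp [PySem.Dict.size, PySem.Dict.keys]

-- ===== VERDICT (by name: the statement is the Claim_ definition above) =====
theorem rpw_scores_py_spec : Claim_equal_rpw_scores_py := by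
  intro tasks times preds _hdom hpre
  obtain ⟨hpre1, hpre2⟩ := hpre
  show rpw_scores_py tasks times preds = rpw_scores_py_alt tasks times preds
  set predsD := PySem.Dict.ofList preds with hpredsD
  set timesD := PySem.Dict.ofList times with htimesD
  set SA := succsA tasks predsD with hSA
  set SB := succsB tasks predsD with hSB
  set U := PySem.List.dedup tasks with hU
  set L := pvPeel (pvSuccOf tasks predsD) U.length U with hL0
  have hUnodup : U.Nodup := PySem.List.nodup_dedup tasks
  have hperm : L.Perm U := pvPeel_perm _ _ U hUnodup hpre2
  have hmemL : ∀ x, x ∈ L ↔ x ∈ tasks := by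
    intro x
    rw [hperm.mem_iff, hU, PySem.List.dedup_eq_ofList]
    exact PySem.Set.mem_ofList tasks x
  obtain ⟨hlink, hchar⟩ := succs_char tasks predsD
  have hsuccA : ∀ u ∈ tasks, ∀ v, (v ∈ (SA.getD u PySem.Set.empty : List Int))
      ↔ (v ∈ tasks ∧ (predsD.getD v []).contains u = true) := by
    intro u hu v
    obtain ⟨s, hs, hv⟩ := hchar u hu
    rw [PySem.Dict.getD_of_get?_eq_some _ _ hs]
    exact hv v
  have hsuccB_eq : ∀ u ∈ tasks, SB.getD u [] = (SA.getD u PySem.Set.empty : List Int) := by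
    intro u hu
    obtain ⟨s, hs, hv⟩ := hchar u hu
    have hb : SB.get? u = some s := by rw [hlink u, if_pos hu, hs]
    rw [PySem.Dict.getD_of_get?_eq_some _ _ hb, PySem.Dict.getD_of_get?_eq_some _ _ hs]
  have hT : TopOrd (fun u => (SA.getD u PySem.Set.empty : List Int)) L := by
    intro l1 u l2 hLs v hv
    have hu : u ∈ tasks := (hmemL u).1 (by rw [hLs]; simp)
    have hv' := (hsuccA u hu v).1 hv
    have hvp : v ∈ pvSuccOf tasks predsD u := List.mem_filter.2 ⟨hv'.1, hv'.2⟩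
    have hvU : v ∈ U := by
      rw [hU, PySem.List.dedup_eq_ofList]
      exact (PySem.Set.mem_ofList tasks v).2 hv'.1
    exact pvPeel_toporder (pvSuccOf tasks predsD) U.length U l1 u l2 hLs v hvp hvU
  have ht : ∀ u ∈ L, timesD.get? u = some (timesD.getD u 0) := by
    intro u hu
    have hut : u ∈ tasks := (hmemL u).1 hu
    exact pv_contains_get? timesD u 0 (List.all_eq_true.1 hpre1 u hut)
  have hLlen : L.length = U.length := hpre2
  have hUlen : U.length ≤ tasks.length := by
    rw [hU, PySem.List.dedup_eq_ofList]
    exact PySem.Set.length_ofList_le tasks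
  -- A side: the port equals the insert-loop of the fixpoint values
  obtain ⟨memoF, hAfold, _⟩ := rpwA_fold SA timesD L hT ht tasks
    (fun i hi => (hmemL i).2 hi) (tasks.length + 1) (by omega)
    PySem.Dict.empty PySem.Dict.empty
    (by intro u x h; rw [PySem.Dict.get?_empty] at h; cases h)
  have hA : rpw_scores_py tasks times preds
      = (tasks.foldl (fun d i => d.insert i
          (valF (fun u => (SA.getD u PySem.Set.empty : List Int)) (fun u => timesD.getD u 0) L.length i))
          PySem.Dict.empty).items := by
    simp only [rpw_scores_py, ← htimesD, ← hpredsD, ← hSA, hAfold]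
  -- B side
  have hscore0 : ∀ x, (tasks.foldl (fun d u => d.insert u (timesD.getD u 0)) PySem.Dict.empty).get? x
      = if x ∈ tasks then some (valF (fun u => SB.getD u []) (fun u => timesD.getD u 0) 0 x) else none := by
    intro x
    rw [pv_get?_foldl_insert tasks (fun u => timesD.getD u 0) PySem.Dict.empty x]
    by_cases hx : x ∈ tasks <;> simp [hx, PySem.Dict.get?_empty, valF]
  have hSsub : ∀ u ∈ tasks, ∀ v ∈ SB.getD u [], v ∈ tasks := by
    intro u hu v hv
    rw [hsuccB_eq u hu] at hv
    exact ((hsuccA u hu v).1 hv).1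
  have hsize : (tasks.foldl (fun d u => d.insert u (timesD.getD u 0)) PySem.Dict.empty).size = U.length := by
    rw [pv_size_keys, pv_keys_foldl_insert_fn, hU, PySem.List.dedup_eq_ofList]
  have hBall := bRounds_get? tasks timesD SB hSsub
    ((tasks.foldl (fun d u => d.insert u (timesD.getD u 0)) PySem.Dict.empty).size) 0
    (tasks.foldl (fun d u => d.insert u (timesD.getD u 0)) PySem.Dict.empty) hscore0
  have hB : rpw_scores_py_alt tasks times preds
      = (bRounds tasks timesD SB
          ((tasks.foldl (fun d u => d.insert u (timesD.getD u 0)) PySem.Dict.empty).size)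
          (tasks.foldl (fun d u => d.insert u (timesD.getD u 0)) PySem.Dict.empty)).items := by
    simp only [rpw_scores_py_alt, ← htimesD, ← hpredsD, ← hSB]
  -- both dicts have keys = ofList tasks and value valF … at every key
  have hkeysA : (tasks.foldl (fun d i => d.insert i
        (valF (fun u => (SA.getD u PySem.Set.empty : List Int)) (fun u => timesD.getD u 0) L.length i))
        PySem.Dict.empty).keys = PySem.Set.ofList tasks := pv_keys_foldl_insert_fn tasks _
  have hkeysB : (bRounds tasks timesD SB
        ((tasks.foldl (fun d u => d.insert u (timesD.getD u 0)) PySem.Dict.empty).size)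
        (tasks.foldl (fun d u => d.insert u (timesD.getD u 0)) PySem.Dict.empty)).keys
      = PySem.Set.ofList tasks :=
    keys_bRounds tasks timesD SB _ _ (pv_keys_foldl_insert_fn tasks _)
  have hvalEq : ∀ k ∈ tasks,
      valF (fun u => SB.getD u []) (fun u => timesD.getD u 0) U.length k
        = valF (fun u => (SA.getD u PySem.Set.empty : List Int)) (fun u => timesD.getD u 0) L.length k := by
    intro k hk
    rw [hLlen]
    exact valF_congr _ _ _ tasks hsuccB_eq hSsub U.length k hk
  rw [hA, hB,
    pv_items_eq_keys_map _ (0 : Int) (by rw [hkeysA]; exact PySem.Set.nodup_ofList tasks),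
    pv_items_eq_keys_map _ (0 : Int) (by rw [hkeysB]; exact PySem.Set.nodup_ofList tasks),
    hkeysA, hkeysB]
  refine List.map_congr_left ?_
  intro k hk
  have hkt : k ∈ tasks := (PySem.Set.mem_ofList tasks k).1 hk
  have hgA : (tasks.foldl (fun d i => d.insert i
        (valF (fun u => (SA.getD u PySem.Set.empty : List Int)) (fun u => timesD.getD u 0) L.length i))
        PySem.Dict.empty).getD k 0
      = valF (fun u => (SA.getD u PySem.Set.empty : List Int)) (fun u => timesD.getD u 0) L.length k := by
    apply PySem.Dict.getD_of_get?_eq_some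
    rw [pv_get?_foldl_insert, if_pos hkt]
  have hgB : (bRounds tasks timesD SB
        ((tasks.foldl (fun d u => d.insert u (timesD.getD u 0)) PySem.Dict.empty).size)
        (tasks.foldl (fun d u => d.insert u (timesD.getD u 0)) PySem.Dict.empty)).getD k 0
      = valF (fun u => (SA.getD u PySem.Set.empty : List Int)) (fun u => timesD.getD u 0) L.length k := by
    have h := hBall k
    rw [if_pos hkt] at h
    rw [PySem.Dict.getD_of_get?_eq_some _ _ h, Nat.zero_add, hsize]
    exact hvalEq k hkt
  rw [hgA, hgB]
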